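-- pv_equiv track=rewrite | github.com/TACC/protx-dashboard | protx/utils/plotly_figures.py | wrap_text
-- ===== SOURCE A (Python) =====
-- def wrap_text(text):
--     if len(text) > 25:
--         text_template = '{}{}{}'
--         split_disp = text.split(' ')
--         new_disp = split_disp[0]
--         newline_count = 0
--         for word in split_disp[1:]:
--             if (len(new_disp) >= 25) & (newline_count == 0):
--                 separator = '<br>'
--                 newline_count = 1
--             else:
--                 separator = ' '
--             new_disp = text_template.format(new_disp, separator, word)
--
--         return new_disp
--
--     else:
--         return text
-- ===== SOURCE B (Python) =====
-- def wrap_text(text):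
--     if len(text) <= 25:
--         return text
--     words = text.split(' ')
--     head = words[0]
--     i = 1
--     while i < len(words) and len(head) < 25:
--         head = head + ' ' + words[i]
--         i += 1
--     if i == len(words):
--         return head
--     return head + '<br>' + ' '.join(words[i:])
-- ===== Notes on version B (the rewrite author's own statement) =====
-- stated objective: simpler
-- what changed: B separates the work into two phases - a while loop that only finds the break index by growing the head prefix, then one join for the tail - instead of A's single word-by-word scan that rebuilds the whole string with a sentinel flag choosing the separator inline.
import Mathlib
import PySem

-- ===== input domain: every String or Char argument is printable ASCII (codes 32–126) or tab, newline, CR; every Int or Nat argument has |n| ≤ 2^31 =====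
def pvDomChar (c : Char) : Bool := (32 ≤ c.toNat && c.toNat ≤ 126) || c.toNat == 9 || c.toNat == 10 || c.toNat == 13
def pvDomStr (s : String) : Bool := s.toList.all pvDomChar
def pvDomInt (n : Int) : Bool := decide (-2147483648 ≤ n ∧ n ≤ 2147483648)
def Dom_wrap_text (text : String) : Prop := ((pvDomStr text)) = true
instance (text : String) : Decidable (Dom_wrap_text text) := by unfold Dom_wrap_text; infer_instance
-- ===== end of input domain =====

-- B finds the break index with a prefix-growing loop and assembles head/tail with one join,
-- instead of A's single scan that appends word by word with a sentinel flag (objective: simpler).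

-- ===== PORT A =====
-- one loop step of A: pick the separator by the flag, append, update the flag
def wrapStepA (st : List Char × Int) (word : List Char) : List Char × Int :=
  if (decide (25 ≤ st.1.length)) && (st.2 == 0) then
    (st.1 ++ ('<' :: 'b' :: 'r' :: '>' :: []) ++ word, 1)
  else
    (st.1 ++ ' ' :: word, st.2)

def wrap_text (text : String) : Option String :=
  let cs := text.toList
  if 25 < cs.length then
    match PySem.Chars.splitOn cs [' '] with
    | [] => none   -- unreachable: split(' ') is never empty (split_disp[0] would be IndexError)
    | w0 :: rest =>
      some (String.ofList (rest.foldl wrapStepA (w0, (0 : Int))).1)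
  else some text

-- ===== PORT B =====
-- B's while loop: grow the head while it is shorter than 25, return it with the remaining words
def wrapHead (h : List Char) (rest : List (List Char)) : List Char × List (List Char) :=
  match rest with
  | [] => (h, [])
  | w :: rs => if h.length < 25 then wrapHead (h ++ ' ' :: w) rs else (h, w :: rs)

def wrap_text_alt (text : String) : Option String :=
  let cs := text.toList
  if cs.length ≤ 25 then some text
  else
    match PySem.Chars.splitOn cs [' '] with
    | [] => none   -- unreachable: split(' ') is never empty (words[0] would be IndexError)
    | w0 :: rest =>
      let p := wrapHead w0 rest
      some (String.ofList (if p.2 = [] then p.1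
                       else p.1 ++ ('<' :: 'b' :: 'r' :: '>' :: []) ++ PySem.Chars.join [' '] p.2))

-- ===== PRECONDITION & SPEC =====
def Spec_wrap_text (text : String) (out : Option String) : Prop := out = wrap_text_alt text
instance (text : String) (out : Option String) : Decidable (Spec_wrap_text text out) := by unfold Spec_wrap_text; infer_instance

-- ===== CLAIM (what is proved, stated in full; the proofs are below) =====
def Claim_equal_wrap_text : Prop := ∀ (text : String), Dom_wrap_text text → Spec_wrap_text text (wrap_text text)

-- ===== LEMMAS AND PROOFS =====

-- once the flag is 1, A's loop is a plain space-join fold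
theorem foldl_stepA_one (l : List (List Char)) : ∀ (d : List Char),
    l.foldl wrapStepA (d, (1 : Int)) = (l.foldl (fun a w => a ++ ' ' :: w) d, 1) := by
  induction l with
  | nil => intro d; rfl
  | cons w rs ih =>
    intro d
    have hc : (decide (25 ≤ d.length) && ((1 : Int) == 0)) = false := by simp
    simp only [List.foldl_cons, wrapStepA, hc, Bool.false_eq_true, if_false]
    exact ih _

theorem foldl_space_eq (l : List (List Char)) : ∀ (x : List Char),
    l.foldl (fun a w => a ++ ' ' :: w) x = x ++ l.flatMap (fun w => ' ' :: w) := by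
  induction l with
  | nil => intro x; simp
  | cons w rs ih => intro x; simp [ih, List.append_assoc]

theorem join_space_cons (w : List Char) (rs : List (List Char)) :
    PySem.Chars.join [' '] (w :: rs) = w ++ rs.flatMap (fun v => ' ' :: v) := by
  induction rs generalizing w with
  | nil => simp [PySem.Chars.join_singleton]
  | cons v vs ih => simp [PySem.Chars.join_cons_cons, ih, List.append_assoc]

-- the main invariant: A's scan from flag 0 equals B's head/tail assembly
theorem stepA_eq_head (l : List (List Char)) : ∀ (d : List Char),
    (l.foldl wrapStepA (d, (0 : Int))).1 =
      (if (wrapHead d l).2 = [] then (wrapHead d l).1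
       else (wrapHead d l).1 ++ ('<' :: 'b' :: 'r' :: '>' :: []) ++ PySem.Chars.join [' '] (wrapHead d l).2) := by
  induction l with
  | nil => intro d; simp [wrapHead]
  | cons w rs ih =>
    intro d
    by_cases h : d.length < 25
    · have hc : (decide (25 ≤ d.length) && ((0 : Int) == 0)) = false := by
        simp; omega
      simp only [List.foldl_cons, wrapStepA, hc, Bool.false_eq_true, if_false, wrapHead, h, if_true]
      exact ih _
    · have hc : (decide (25 ≤ d.length) && ((0 : Int) == 0)) = true := by
        simp; omega
      simp only [List.foldl_cons, wrapStepA, hc, if_true, wrapHead, h, if_false]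
      rw [foldl_stepA_one, foldl_space_eq, join_space_cons]
      simp [List.append_assoc]

-- ===== VERDICT (by name: the statement is the Claim_ definition above) =====
theorem wrap_text_spec : Claim_equal_wrap_text := by
  intro text _
  unfold Spec_wrap_text wrap_text wrap_text_alt
  by_cases hlen : 25 < text.toList.length
  · rw [if_pos hlen, if_neg (by omega)]
    cases h : PySem.Chars.splitOn text.toList [' '] with
    | nil => rfl
    | cons w0 rest => simp only [stepA_eq_head]
  · rw [if_neg hlen, if_pos (by omega)]
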